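-- pv_equiv track=rewrite | github.com/k-tsky/DigiCod | Block-Faltungs_codes.py | generate_codewords_crc
-- ===== SOURCE A (Python) =====
-- def poly_div(dividend, divisor):
--     remainder = dividend[:]
--     while len(remainder) >= len(divisor):
--         if remainder[0] == 1:
--             for i in range(len(divisor)):
--                 if i < len(remainder):
--                     remainder[i] ^= divisor[i]
--         remainder.pop(0)
--     return remainder
--
-- def message_to_polynomial(msg_bits, r):
--     return msg_bits + [0] * r
--
-- def encode(generator, message_bits):
--     r = len(generator) - 1
--     poly = message_to_polynomial(message_bits, r)
--     remainder = poly_div(poly[:], generator)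
--     return message_bits + remainder
--
-- def int_to_bitlist(x, length):
--     bits = []
--     for i in range(length - 1, -1, -1):
--         bits.append((x >> i) & 1)
--     return bits
--
-- def generate_codewords_crc(generator):
--     k = len(generator) - 1
--     n = 2 ** (k - 1) - 1
--     m = n - k
--     codewords = []
--     for i in range(min(2 ** m, 6)):
--         msg = int_to_bitlist(i, m)
--         codeword = encode(generator, msg)
--         codewords.append(codeword)
--     return codewords, m, n, k
-- ===== SOURCE B (Python) =====
-- def generate_codewords_crc(generator):
--     k = len(generator) - 1
--     n = 2 ** (k - 1) - 1
--     m = n - k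
--     taps = generator[1:]
--
--     def crc_codeword(i):
--         msg = [(i >> j) & 1 for j in range(m - 1, -1, -1)]
--         padded = msg + [0] * k
--         reg, stream = padded[:k], padded[k:]
--         for b in stream:
--             top, reg = reg[0], reg[1:] + [b]
--             if top == 1:
--                 reg = [x ^ g for x, g in zip(reg, taps)]
--         return msg + reg
--
--     return [crc_codeword(i) for i in range(min(2 ** m, 6))], m, n, k
-- ===== Notes on version B (the rewrite author's own statement) =====
-- stated objective: alternative
-- what changed: Replaces the shrinking-list polynomial long division (in-place XOR sweep + pop(0) per step) with a fixed-size k-cell LFSR shift register that streams the padded message bits through it.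
import Mathlib
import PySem

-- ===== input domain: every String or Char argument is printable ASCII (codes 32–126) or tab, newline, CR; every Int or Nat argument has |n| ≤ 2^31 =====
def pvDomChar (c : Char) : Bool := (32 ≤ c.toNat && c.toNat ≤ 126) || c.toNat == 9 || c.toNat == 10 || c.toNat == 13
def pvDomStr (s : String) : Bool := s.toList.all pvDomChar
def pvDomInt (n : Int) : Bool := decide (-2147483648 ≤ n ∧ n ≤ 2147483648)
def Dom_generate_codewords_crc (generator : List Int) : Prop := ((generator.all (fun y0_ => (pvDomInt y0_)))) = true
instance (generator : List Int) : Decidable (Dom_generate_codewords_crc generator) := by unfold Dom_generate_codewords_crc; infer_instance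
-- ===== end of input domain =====

-- B replaces A's shrinking-list long division (XOR sweep + pop(0)) by a fixed-width LFSR
-- shift register streaming the padded message; objective: alternative structure.

-- ===== PORT A =====

-- inner loop of poly_div: 'for i in range(len(divisor)): if i < len(remainder): remainder[i] ^= divisor[i]'
-- (positions beyond min of the lengths are untouched — exactly zipWith on the common prefix)
def xorInto (rem div : List Int) : List Int :=
  (List.zipWith PySem.Int.bxor rem div) ++ rem.drop div.length

-- needed by the port's termination proof
theorem xorInto_length (rem div : List Int) : (xorInto rem div).length = rem.length := by
  simp [xorInto]; omega

-- 'while len(remainder) >= len(divisor): …'; the '[] => []' branch is where Python raises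
-- IndexError (only reachable with divisor = [], excluded by Pre_)
def poly_div_loop (divisor remainder : List Int) : List Int :=
  if divisor.length ≤ remainder.length then
    match remainder with
    | [] => []
    | h :: t =>
      let rem' := if h = 1 then xorInto (h :: t) divisor else h :: t
      poly_div_loop divisor rem'.tail
  else remainder
termination_by remainder.length
decreasing_by
  simp only [List.length_tail]
  split <;> simp [xorInto_length]

def poly_div (dividend divisor : List Int) : List Int :=
  poly_div_loop divisor dividend

def message_to_polynomial (msg_bits : List Int) (r : Int) : List Int :=
  msg_bits ++ List.replicate r.toNat 0    -- [0]*r, empty for r ≤ 0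

def encode (generator message_bits : List Int) : List Int :=
  let r : Int := (generator.length : Int) - 1
  let poly := message_to_polynomial message_bits r
  let remainder := poly_div poly generator
  message_bits ++ remainder

def int_to_bitlist (x length : Int) : List Int :=
  (PySem.List.pyRange (length - 1) (-1) (-1)).foldl
    (fun bits i => bits ++ [PySem.Int.band (x >>> i.toNat) 1]) []

def generate_codewords_crc (generator : List Int) : List (List Int) × Int × Int × Int :=
  let k : Int := (generator.length : Int) - 1
  let n : Int := 2 ^ (k - 1).toNat - 1      -- 2**(k-1): k ≥ 1 under Pre_
  let m : Int := n - k
  let codewords := (PySem.List.pyRange 0 (min (2 ^ m.toNat) 6) 1).foldl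
    (fun acc i => acc ++ [encode generator (int_to_bitlist i m)]) []
  (codewords, m, n, k)

-- ===== PORT B =====

-- one LFSR step: shift the register, feed bit b in, XOR the taps when the bit shifted out is 1
def lfsrStep (taps reg : List Int) (b : Int) : List Int :=
  let top := reg.headD 0            -- reg[0]; reg ≠ [] under Pre_
  let reg' := reg.tail ++ [b]
  if top = 1 then List.zipWith PySem.Int.bxor reg' taps else reg'

def crc_codeword (taps : List Int) (k m : Int) (i : Int) : List Int :=
  let msg := (PySem.List.pyRange (m - 1) (-1) (-1)).map
    (fun j => PySem.Int.band (i >>> j.toNat) 1)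
  let padded := msg ++ List.replicate k.toNat 0
  let reg := padded.take k.toNat
  let stream := padded.drop k.toNat
  msg ++ stream.foldl (lfsrStep taps) reg

def generate_codewords_crc_alt (generator : List Int) : List (List Int) × Int × Int × Int :=
  let k : Int := (generator.length : Int) - 1
  let n : Int := 2 ^ (k - 1).toNat - 1
  let m : Int := n - k
  let taps := generator.tail        -- generator[1:]
  ((PySem.List.pyRange 0 (min (2 ^ m.toNat) 6) 1).map (crc_codeword taps k m), m, n, k)

-- ===== PRECONDITION & SPEC =====
-- A raises for len(generator) ≤ 3: for len ≤ 1, 2**(k-1) is a float; for len 2 or 3, m < 0 makes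
-- 2**m a float; either way range(...) raises TypeError. Pre_ is exactly where A returns.
def Pre_generate_codewords_crc (generator : List Int) : Prop := 4 ≤ generator.length
instance (generator : List Int) : Decidable (Pre_generate_codewords_crc generator) := by
  unfold Pre_generate_codewords_crc; infer_instance

def pvWitness_generate_codewords_crc : List Int := [1, 0, 1, 1, 1]

def Spec_generate_codewords_crc (generator : List Int) (out : List (List Int) × Int × Int × Int) : Prop := out = generate_codewords_crc_alt generator
instance (generator : List Int) (out : List (List Int) × Int × Int × Int) : Decidable (Spec_generate_codewords_crc generator out) := by unfold Spec_generate_codewords_crc; infer_instance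

-- ===== CLAIM (what is proved, stated in full; the proofs are below) =====
def Claim_equal_generate_codewords_crc : Prop := ∀ (generator : List Int), Dom_generate_codewords_crc generator → Pre_generate_codewords_crc generator → Spec_generate_codewords_crc generator (generate_codewords_crc generator)

-- ===== LEMMAS AND PROOFS =====

-- core invariant: long division on (reg ++ stream) = streaming the LFSR over stream from reg
theorem polydiv_eq_lfsr (g0 : Int) (taps : List Int) (htaps : taps ≠ [])
    (stream : List Int) :
    ∀ reg : List Int, reg.length = taps.length →
      poly_div_loop (g0 :: taps) (reg ++ stream) = stream.foldl (lfsrStep taps) reg := by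
  induction stream with
  | nil =>
    intro reg hreg
    rw [poly_div_loop.eq_def]
    simp [hreg]
  | cons b s ih =>
    intro reg hreg
    match reg with
    | [] => exact absurd (hreg.symm.trans (List.length_eq_zero_iff.mpr rfl)) (by
        simpa using List.length_pos_of_ne_nil htaps |>.ne')
    | r0 :: rtail =>
      have hlen : (rtail ++ [b]).length = taps.length := by
        simp at hreg ⊢; omega
      rw [poly_div_loop.eq_def]
      have hcond : (g0 :: taps).length ≤ ((r0 :: rtail) ++ b :: s).length := by
        simp at hreg ⊢; omega
      rw [if_pos hcond]
      simp only [List.cons_append]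
      by_cases h1 : r0 = 1
      · rw [if_pos h1]
        have hx : (xorInto (r0 :: (rtail ++ b :: s)) (g0 :: taps)).tail
            = List.zipWith PySem.Int.bxor (rtail ++ [b]) taps ++ s := by
          simp only [xorInto, List.zipWith_cons_cons, List.length_cons, List.drop_succ_cons]
          have hsplit : rtail ++ b :: s = (rtail ++ [b]) ++ s := by simp
          rw [hsplit, show taps = taps ++ [] from (List.append_nil taps).symm,
            List.zipWith_append (h := hlen)]
          simp only [List.zipWith_nil_right, List.append_nil]
          rw [← hlen, List.drop_left]
          rfl
        rw [hx, ih _ (by simp [List.length_zipWith, hlen])]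
        simp [lfsrStep, h1]
      · rw [if_neg h1]
        have hsplit : rtail ++ b :: s = (rtail ++ [b]) ++ s := by simp
        simp only [List.tail_cons]
        rw [hsplit, ih _ hlen]
        simp [lfsrStep, h1]

-- A's append-accumulator bit loop is the map B uses
theorem int_to_bitlist_eq_map (x L : Int) :
    int_to_bitlist x L = (PySem.List.pyRange (L - 1) (-1) (-1)).map
      (fun j => PySem.Int.band (x >>> j.toNat) 1) := by
  unfold int_to_bitlist
  rw [PySem.List.foldl_append_singleton_eq_map]
  simp

-- per-message equality of the two encoders
theorem encode_eq_crc_codeword (g0 : Int) (taps : List Int) (htaps : taps ≠ []) (m i : Int) :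
    encode (g0 :: taps) (int_to_bitlist i m)
      = crc_codeword taps ((((g0 :: taps).length : Int) - 1)) m i := by
  have hk : ((((g0 :: taps).length : Int) - 1)).toNat = taps.length := by
    simp
  simp only [encode, crc_codeword, message_to_polynomial, poly_div, int_to_bitlist_eq_map, hk]
  set msg := (PySem.List.pyRange (m - 1) (-1) (-1)).map
    (fun j => PySem.Int.band (i >>> j.toNat) 1)
  have hlen : ((msg ++ List.replicate taps.length 0).take taps.length).length = taps.length := by
    simp only [List.length_take, List.length_append, List.length_replicate]; omega
  have hsplit : msg ++ List.replicate taps.length 0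
      = (msg ++ List.replicate taps.length 0).take taps.length
        ++ (msg ++ List.replicate taps.length 0).drop taps.length :=
    (List.take_append_drop _ _).symm
  conv_lhs => rw [hsplit, polydiv_eq_lfsr g0 taps htaps _ _ hlen]

-- ===== VERDICT (by name: the statement is the Claim_ definition above) =====
theorem generate_codewords_crc_spec : Claim_equal_generate_codewords_crc := by
  intro generator _hdom hpre
  unfold Pre_generate_codewords_crc at hpre
  unfold Spec_generate_codewords_crc
  match generator, hpre with
  | g0 :: taps, hpre =>
    have htaps : taps ≠ [] := by
      intro h; subst h; simp at hpre
    simp only [generate_codewords_crc, generate_codewords_crc_alt,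
      PySem.List.foldl_append_singleton_eq_map, List.tail_cons]
    refine congrArg (fun l => (l, _, _, _)) ?_
    exact List.map_congr_left (fun i _ => encode_eq_crc_codeword g0 taps htaps _ i)
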